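-- pv_equiv track=rewrite | github.com/thierryxdp/TCC | problems/831/solution_332649.py | lingua_p1
-- ===== SOURCE A (Python) =====
-- def lingua_p1(palavra):
--     """ Essa função recebe uma palavra e depois de cada vogal
--     é inserida a letra p, e transforma todas as as letras
--     maiusculas em minusculas.
--
--     assinatura: string---> string"""
--     texto_minusculo = palavra.lower()
--     lista_texto = list(texto_minusculo)
--     frase_p = []
--     for letra in lista_texto:
--         if letra in 'aeiouáàéíóú':
--             frase_p = frase_p + list(letra) + list('p') + list(letra)
--         else:
--             frase_p = frase_p + list(letra)
--     frase_p = (''.join(frase_p))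
--     return frase_p
-- ===== SOURCE B (Python) =====
-- def lingua_p1(palavra):
--     s = palavra.lower()
--     for v in 'aeiouáàéíóú':
--         s = s.replace(v, v + 'p' + v)
--     return s
-- ===== Notes on version B (the rewrite author's own statement) =====
-- stated objective: faster
-- what changed: B replaces A's single char-by-char loop that rebuilds the accumulator with quadratic list concatenation by lowercasing once and then running one full-string str.replace pass per vowel (v -> v+'p'+v); this is correct because the inserted 'p' is never a vowel, so the passes are independent.
import Mathlib
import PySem

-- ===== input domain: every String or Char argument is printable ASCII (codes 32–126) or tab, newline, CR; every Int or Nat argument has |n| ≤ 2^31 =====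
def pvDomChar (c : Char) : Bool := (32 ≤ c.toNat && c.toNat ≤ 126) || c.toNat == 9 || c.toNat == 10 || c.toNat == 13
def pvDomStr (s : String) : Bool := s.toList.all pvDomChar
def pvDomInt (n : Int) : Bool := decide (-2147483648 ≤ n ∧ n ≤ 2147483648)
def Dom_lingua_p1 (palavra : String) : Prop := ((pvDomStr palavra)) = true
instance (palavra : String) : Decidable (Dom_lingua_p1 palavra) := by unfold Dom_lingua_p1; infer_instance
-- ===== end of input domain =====

-- B lowercases once and then runs one str.replace pass per vowel (v -> v+'p'+v) instead of
-- A's char-by-char rebuild with quadratic list concatenation (objective: faster, measured).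

-- ===== PORT A =====
def lingua_p1 (palavra : String) : String :=
  let texto_minusculo := PySem.Str.lower palavra
  let lista_texto := texto_minusculo.toList
  let frase_p : List Char :=
    lista_texto.foldl
      (fun frase_p letra =>
        if PySem.Chars.isIn [letra] "aeiouáàéíóú".toList then
          frase_p ++ [letra] ++ ['p'] ++ [letra]
        else
          frase_p ++ [letra]) []
  String.ofList frase_p

-- ===== PORT B =====
def lingua_p1_alt (palavra : String) : String :=
  "aeiouáàéíóú".toList.foldl
    (fun s v => PySem.Str.replace s (String.ofList [v]) (String.ofList [v, 'p', v]))
    (PySem.Str.lower palavra)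

-- ===== PRECONDITION & SPEC =====
def Spec_lingua_p1 (palavra : String) (out : String) : Prop := out = lingua_p1_alt palavra
instance (palavra : String) (out : String) : Decidable (Spec_lingua_p1 palavra out) := by unfold Spec_lingua_p1; infer_instance

-- ===== CLAIM (what is proved, stated in full; the proofs are below) =====
def Claim_equal_lingua_p1 : Prop := ∀ (palavra : String), Dom_lingua_p1 palavra → Spec_lingua_p1 palavra (lingua_p1 palavra)

-- ===== LEMMAS AND PROOFS =====

-- replace with a single-char pattern: its go-loop is a flatMap (given enough fuel).
theorem pv_go_single (v : Char) (new : List Char) (l : List Char) :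
    ∀ (fuel : Nat) (acc : List Char), l.length ≤ fuel →
    PySem.Chars.replace.go [v] new fuel l acc
      = acc.reverse ++ l.flatMap (fun c => if c = v then new else [c]) := by
  induction l with
  | nil => intro fuel acc _; cases fuel <;> simp [PySem.Chars.replace.go]
  | cons c t ih =>
    intro fuel acc h
    cases fuel with
    | zero => simp at h
    | succ fuel =>
      rw [PySem.Chars.replace.go]
      simp only [List.isPrefixOf, Bool.and_true]
      by_cases hc : v = c
      · subst hc
        simp only [BEq.rfl, if_true, List.length_singleton, List.drop_succ_cons, List.drop_zero]
        rw [ih fuel _ (by simpa using h)]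
        simp
      · have hbeq : (v == c) = false := by simpa using hc
        simp only [hbeq, Bool.false_eq_true, if_false]
        rw [ih fuel _ (by simpa using h)]
        have hcv : ¬ (c = v) := fun e => hc e.symm
        simp [hcv]

theorem pv_replace_single (v : Char) (new : List Char) (s : List Char) :
    PySem.Chars.replace s [v] new = s.flatMap (fun c => if c = v then new else [c]) := by
  rw [PySem.Chars.replace]
  simp only [List.isEmpty_cons, Bool.false_eq_true, if_false]
  simpa using pv_go_single v new s s.length [] le_rfl

-- a chain of single-vowel replace passes (pattern list Nodup, 'p' not a pattern) is one flatMap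
theorem pv_chain (vs : List Char) (hnd : vs.Nodup) (hp : 'p' ∉ vs) :
    ∀ s : List Char,
    vs.foldl (fun s v => PySem.Chars.replace s [v] [v, 'p', v]) s
      = s.flatMap (fun c => if c ∈ vs then [c, 'p', c] else [c]) := by
  induction vs with
  | nil => intro s; simp
  | cons v vs ih =>
    intro s
    have hv : v ∉ vs := (List.nodup_cons.mp hnd).1
    have hnd' : vs.Nodup := (List.nodup_cons.mp hnd).2
    have hp' : 'p' ∉ vs := fun h => hp (List.mem_cons_of_mem _ h)
    simp only [List.foldl_cons]
    rw [pv_replace_single, ih hnd' hp', List.flatMap_assoc]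
    apply List.flatMap_congr
    intro c _
    by_cases hc : c = v
    · subst hc
      simp [hv, hp']
    · simp [hc]

-- A's accumulator loop is the same flatMap
theorem pv_foldA (V : List Char) (l : List Char) :
    ∀ acc : List Char,
    l.foldl (fun acc letra =>
        if PySem.Chars.isIn [letra] V then acc ++ [letra] ++ ['p'] ++ [letra]
        else acc ++ [letra]) acc
      = acc ++ l.flatMap (fun c => if c ∈ V then [c, 'p', c] else [c]) := by
  induction l with
  | nil => intro acc; simp
  | cons c t ih =>
    intro acc
    have hin : PySem.Chars.isIn [c] V = true ↔ c ∈ V := by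
      rw [PySem.Chars.isIn_iff_infix, List.singleton_infix_iff]
    by_cases hc : c ∈ V
    · simp only [List.foldl_cons, hin.mpr hc, if_true, ih]
      simp [hc]
    · have : PySem.Chars.isIn [c] V = false := by
        rcases h : PySem.Chars.isIn [c] V with _ | _
        · rfl
        · exact absurd (hin.mp h) hc
      simp only [List.foldl_cons, this, Bool.false_eq_true, if_false, ih]
      simp [hc]

-- B's String-level foldl computed on toList
theorem pv_foldB (vs : List Char) :
    ∀ s : String,
    (vs.foldl (fun s v => PySem.Str.replace s (String.ofList [v]) (String.ofList [v, 'p', v])) s).toList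
      = vs.foldl (fun l v => PySem.Chars.replace l [v] [v, 'p', v]) s.toList := by
  induction vs with
  | nil => intro s; rfl
  | cons v vs ih =>
    intro s
    simp only [List.foldl_cons, ih, PySem.Str.toList_replace, String.toList_ofList]

-- ===== VERDICT (by name: the statement is the Claim_ definition above) =====
theorem lingua_p1_spec : Claim_equal_lingua_p1 := by
  intro palavra _
  unfold Spec_lingua_p1 lingua_p1 lingua_p1_alt
  apply String.toList_injective
  rw [String.toList_ofList, pv_foldB, pv_foldA]
  rw [pv_chain _ (by decide) (by decide)]
  simp
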